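-- pv_equiv track=rewrite | github.com/yuwei29/programs | PythonCode/plain/test23.py | f
-- ===== SOURCE A (Python) =====
-- def f(a):
--     l=[]
--     for i in range(32):
--         l.append(a%2)
--         a//=2
--     ans = 0
--     bns=0
--     for i in range(31,15,-1):
--         ans=ans*2+l[i]
--     for i in range(15,-1,-1):
--         bns=bns*2+l[i]
--     ans = 1024*64*bns+ans
--     return ans
-- ===== SOURCE B (Python) =====
-- def f(a):
--     # Closed-form swap of the two 16-bit halves of a's 32-bit value: no list, no loops.
--     return (a % 65536) * 65536 + (a // 65536) % 65536
-- ===== Notes on version B (the rewrite author's own statement) =====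
-- stated objective: simpler
-- what changed: Replaced the bit-by-bit extraction loop and the two Horner reconstruction loops with a single closed-form arithmetic swap of the two 16-bit halves (low half shifted up plus high half).
import Mathlib
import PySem

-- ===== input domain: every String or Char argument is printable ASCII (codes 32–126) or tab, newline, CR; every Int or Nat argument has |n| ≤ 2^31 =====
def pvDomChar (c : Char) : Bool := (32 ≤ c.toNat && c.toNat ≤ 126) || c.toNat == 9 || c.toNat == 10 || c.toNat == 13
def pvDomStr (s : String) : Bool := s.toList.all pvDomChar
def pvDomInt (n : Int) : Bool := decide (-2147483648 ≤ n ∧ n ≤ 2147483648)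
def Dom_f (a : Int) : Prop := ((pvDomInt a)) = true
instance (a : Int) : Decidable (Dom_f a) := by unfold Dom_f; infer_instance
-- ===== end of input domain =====

-- B replaces A's bit-extraction loop and two reconstruction loops by one closed-form arithmetic swap of the two 16-bit halves (simpler).

-- ===== PORT A =====
def f (a : Int) : Int :=
  let st := (PySem.List.pyRange 0 32 1).foldl
    (fun (st : List Int × Int) _ => (st.1 ++ [PySem.Int.mod st.2 2], PySem.Int.floordiv st.2 2))
    ([], a)
  let l := st.1
  let ans := (PySem.List.pyRange 31 15 (-1)).foldl (fun ans i => ans * 2 + PySem.List.pyGetD l i 0) 0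
  let bns := (PySem.List.pyRange 15 (-1) (-1)).foldl (fun bns i => bns * 2 + PySem.List.pyGetD l i 0) 0
  1024 * 64 * bns + ans

-- ===== PORT B =====
def f_alt (a : Int) : Int :=
  PySem.Int.mod a 65536 * 65536 + PySem.Int.mod (PySem.Int.floordiv a 65536) 65536

-- ===== PRECONDITION & SPEC =====
def Spec_f (a : Int) (out : Int) : Prop := out = f_alt a
instance (a : Int) (out : Int) : Decidable (Spec_f a out) := by unfold Spec_f; infer_instance

-- ===== CLAIM (what is proved, stated in full; the proofs are below) =====
def Claim_equal_f : Prop := ∀ (a : Int), Dom_f a → Spec_f a (f a)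

-- ===== LEMMAS AND PROOFS =====

-- a fold that ignores the list elements is an iterate of the step function
theorem pv_foldl_ignore {α β : Type} (g : β → β) (l : List α) (b : β) :
    l.foldl (fun b _ => g b) b = g^[l.length] b := by
  induction l generalizing b with
  | nil => rfl
  | cons x xs ih => simpa [Function.iterate_succ_apply] using ih (g b)

-- the first loop: after n steps the list holds the n low bits of x and the counter is x / 2^n
theorem pv_iter (n : Nat) : ∀ (l0 : List Int) (x : Int),
    (fun st : List Int × Int => (st.1 ++ [PySem.Int.mod st.2 2], PySem.Int.floordiv st.2 2))^[n] (l0, x)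
      = (l0 ++ (List.range n).map (fun i => (x / 2 ^ i) % 2), x / 2 ^ n) := by
  induction n with
  | zero => intro l0 x; simp
  | succ n ih =>
    intro l0 x
    rw [Function.iterate_succ_apply]
    simp only [PySem.Int.mod_eq_emod_of_pos (by norm_num : (0:Int) < 2),
      PySem.Int.floordiv_eq_ediv_of_pos (by norm_num : (0:Int) < 2)] at ih ⊢
    rw [ih (l0 ++ [x % 2]) (x / 2), Prod.mk.injEq]
    refine ⟨?_, ?_⟩
    · rw [List.range_succ_eq_map]
      simp only [List.map_cons, List.map_map, List.append_assoc, List.singleton_append,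
        pow_zero, Int.ediv_one]
      congr 1
      congr 1
      apply List.map_congr_left
      intro i _
      show x / 2 / 2 ^ i % 2 = x / 2 ^ (i + 1) % 2
      rw [Int.ediv_ediv_of_nonneg (by norm_num), ← pow_succ']
    · rw [Int.ediv_ediv_of_nonneg (by norm_num), ← pow_succ']

-- indexing the bit list
theorem pv_getbit_hi (x : Int) (j : Nat) :
    PySem.List.pyGetD (List.map (fun i => x / 2 ^ i % 2) (List.range 32)) (((31 - j : Nat) : Int)) 0
      = x / 2 ^ (31 - j) % 2 := by
  have h : 31 - j < 32 := by omega
  simp [PySem.List.pyGetD_natCast, List.getD_eq_getElem?_getD, h]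

theorem pv_getbit_lo (x : Int) (j : Nat) :
    PySem.List.pyGetD (List.map (fun i => x / 2 ^ i % 2) (List.range 32)) (((15 - j : Nat) : Int)) 0
      = x / 2 ^ (15 - j) % 2 := by
  have h : 15 - j < 32 := by omega
  simp [PySem.List.pyGetD_natCast, List.getD_eq_getElem?_getD, h]

-- splitting off the top bit of a (k+1)-bit remainder
theorem pv_mod_split (y : Int) (k : Nat) :
    y / 2 ^ k % 2 * 2 ^ k + y % 2 ^ k = y % 2 ^ (k + 1) := by
  have hk : (0:Int) < 2 ^ k := by positivity
  have h1 : y % 2 ^ (k + 1)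
      = (y / 2 ^ k % 2 * 2 ^ k + y % 2 ^ k + 2 ^ (k + 1) * (y / 2 ^ k / 2)) % 2 ^ (k + 1) := by
    congr 1
    have e1 : 2 ^ k * (y / 2 ^ k) + y % 2 ^ k = y := Int.mul_ediv_add_emod y (2 ^ k)
    have e2 : 2 * (y / 2 ^ k / 2) + y / 2 ^ k % 2 = y / 2 ^ k := Int.mul_ediv_add_emod (y / 2 ^ k) 2
    calc y = 2 ^ k * (y / 2 ^ k) + y % 2 ^ k := e1.symm
      _ = 2 ^ k * (2 * (y / 2 ^ k / 2) + y / 2 ^ k % 2) + y % 2 ^ k := by rw [e2]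
      _ = y / 2 ^ k % 2 * 2 ^ k + y % 2 ^ k + 2 ^ (k + 1) * (y / 2 ^ k / 2) := by ring
  rw [h1, Int.add_mul_emod_self_left]
  have hr0 : 0 ≤ y % 2 ^ k := Int.emod_nonneg y (by positivity)
  have hr1 : y % 2 ^ k < 2 ^ k := Int.emod_lt_of_pos y hk
  have hps : (2:Int) ^ (k + 1) = 2 ^ k * 2 := by rw [pow_succ]
  rcases Int.emod_two_eq (y / 2 ^ k) with hb | hb <;>
    rw [hb] <;> rw [eq_comm] <;> apply Int.emod_eq_of_lt (by linarith) (by rw [hps]; linarith)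

-- the reconstruction loops: a Horner fold over descending bit indices rebuilds a remainder
theorem pv_recon (x : Int) : ∀ (k : Nat), ∀ (hi : Nat) (acc : Int), k ≤ hi + 1 →
    (List.range k).foldl (fun s j => s * 2 + x / 2 ^ (hi - j) % 2) acc
      = acc * 2 ^ k + x / 2 ^ (hi + 1 - k) % 2 ^ k := by
  intro k
  induction k with
  | zero => intro hi acc _; simp
  | succ k ih =>
    intro hi acc hk
    rw [List.range_succ_eq_map, List.foldl_cons, List.foldl_map]
    have hfun : (fun (s : Int) (j : Nat) => s * 2 + x / 2 ^ (hi - Nat.succ j) % 2)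
        = (fun (s : Int) (j : Nat) => s * 2 + x / 2 ^ (hi - 1 - j) % 2) := by
      funext s j
      have hsub : hi - Nat.succ j = hi - 1 - j := by omega
      rw [hsub]
    rw [hfun]
    simp only [Nat.sub_zero]
    rw [ih (hi - 1) (acc * 2 + x / 2 ^ hi % 2) (by omega)]
    by_cases hhi : 1 ≤ hi
    · have hm : hi - 1 + 1 - k = hi - k := by omega
      have hs : hi + 1 - (k + 1) = hi - k := by omega
      rw [hm, hs]
      have hkhi : k ≤ hi := by omega
      have hdiv : x / 2 ^ hi = x / 2 ^ (hi - k) / 2 ^ k := by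
        rw [Int.ediv_ediv_of_nonneg (by positivity), ← pow_add, Nat.sub_add_cancel hkhi]
      rw [hdiv, ← pv_mod_split (x / 2 ^ (hi - k)) k]
      ring
    · have h0 : hi = 0 := by omega
      have hk0 : k = 0 := by omega
      subst h0; subst hk0
      norm_num [Int.emod_one]

-- ===== VERDICT (by name: the statement is the Claim_ definition above) =====
theorem f_spec : Claim_equal_f := by
  intro a _
  unfold Spec_f f f_alt
  simp only []
  rw [pv_foldl_ignore (fun st : List Int × Int =>
        (st.1 ++ [PySem.Int.mod st.2 2], PySem.Int.floordiv st.2 2))]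
  have hlen : (PySem.List.pyRange 0 32 1).length = 32 := by decide
  rw [hlen, pv_iter 32 [] a]
  have h1 : PySem.List.pyRange 31 15 (-1)
      = (List.range 16).map (fun j => (((31 - j : Nat)) : Int)) := by decide
  have h2 : PySem.List.pyRange 15 (-1) (-1)
      = (List.range 16).map (fun j => (((15 - j : Nat)) : Int)) := by decide
  simp only [List.nil_append]
  rw [h1, h2, List.foldl_map, List.foldl_map]
  simp only [pv_getbit_hi, pv_getbit_lo]
  rw [pv_recon a 16 31 0 (by omega), pv_recon a 16 15 0 (by omega)]
  rw [PySem.Int.mod_eq_emod_of_pos (by norm_num : (0:Int) < 65536),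
      PySem.Int.mod_eq_emod_of_pos (by norm_num : (0:Int) < 65536),
      PySem.Int.floordiv_eq_ediv_of_pos (by norm_num : (0:Int) < 65536)]
  norm_num
  ring
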